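-- pv_equiv track=rewrite | github.com/mahitha022/CrackYourPlacement | Difficulty: Hard/Maximum of minimum for every window size/maximum-of-minimum-for-every-window-size.py | maxOfMin
-- ===== SOURCE A (Python) =====
-- def maxOfMin(arr,n):
--     # code here
--     def left(ind):
--         for j in range(ind-1,-1,-1):
--             if(arr[ind]>arr[j]):
--                 return ind-(j+1)
--         return ind
--
--     def right(ind):
--         for j in range(ind+1,n):
--             if(arr[ind]>arr[j]):
--                 return (j-1)-ind
--         return n-ind-1
--
--     res=[0]*(n+1)
--     for i in range(n):
--         m=left(i)+right(i)+1
--         res[m]=max(arr[i],res[m])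
--
--     for i in range(n-1,0,-1):
--         res[i]=max(res[i],res[i+1])
--
--     return res[1:]
-- ===== SOURCE B (Python) =====
-- def maxOfMin(arr, n):
--     # O(n): monotonic-stack nearest-strictly-smaller on the prefix and its
--     # reverse, then one fill pass and a suffix-max sweep (A is O(n^2) scans).
--     if n <= 0:
--         return []
--     a = arr[:n]
--
--     def nearest_smaller(xs):
--         out = []
--         st = []  # indices; values strictly increasing bottom-to-top
--         for i, x in enumerate(xs):
--             while st and xs[st[-1]] >= x:
--                 st.pop()
--             out.append(st[-1] if st else -1)
--             st.append(i)
--         return out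
--
--     prev = nearest_smaller(a)
--     prev_rev = nearest_smaller(a[::-1])
--
--     res = [0] * (n + 1)
--     for i in range(n):
--         q = prev_rev[n - 1 - i]
--         nxt = (n - 1 - q) if q != -1 else n
--         m = nxt - prev[i] - 1
--         if a[i] > res[m]:
--             res[m] = a[i]
--     for k in range(n - 1, 0, -1):
--         if res[k + 1] > res[k]:
--             res[k] = res[k + 1]
--     return res[1:]
-- ===== Notes on version B (the rewrite author's own statement) =====
-- stated objective: faster
-- what changed: replaces A's per-index quadratic left/right linear scans by two monotonic-stack nearest-strictly-smaller passes (one on the prefix, one on its reverse) followed by the same fill and suffix-max sweep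
import Mathlib
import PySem

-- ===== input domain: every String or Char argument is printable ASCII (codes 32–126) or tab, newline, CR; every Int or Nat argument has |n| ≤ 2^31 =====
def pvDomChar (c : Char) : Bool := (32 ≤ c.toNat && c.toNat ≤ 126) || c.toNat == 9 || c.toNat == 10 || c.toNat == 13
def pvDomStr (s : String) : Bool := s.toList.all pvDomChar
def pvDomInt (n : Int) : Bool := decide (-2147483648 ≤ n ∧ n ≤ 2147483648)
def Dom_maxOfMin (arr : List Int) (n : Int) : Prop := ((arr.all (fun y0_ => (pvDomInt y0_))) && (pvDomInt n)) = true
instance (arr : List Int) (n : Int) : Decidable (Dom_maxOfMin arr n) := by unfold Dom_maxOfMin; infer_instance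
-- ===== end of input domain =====

-- B replaces A's quadratic per-index scans by two monotonic-stack passes; equivalence of the return values is proved on Pre_ (n ≤ len(arr), exactly where A does not raise).

-- ===== PORT A =====
-- left(ind): for j in range(ind-1,-1,-1): if arr[ind]>arr[j]: return ind-(j+1); return ind
-- fuel k = number of remaining j's; current j = k-1
def pvLeftAux (arr : List Int) (ind : Int) : Nat → Int
  | 0 => ind
  | k+1 => if PySem.List.pyGetD arr ind 0 > PySem.List.pyGetD arr (k : Int) 0
           then ind - ((k : Int) + 1) else pvLeftAux arr ind k

def pvLeft (arr : List Int) (ind : Int) : Int := pvLeftAux arr ind ind.toNat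

-- right(ind): for j in range(ind+1,n): if arr[ind]>arr[j]: return (j-1)-ind; return n-ind-1
def pvRightAux (arr : List Int) (n ind : Int) : Nat → Int → Int
  | 0, _ => n - ind - 1
  | c+1, j => if PySem.List.pyGetD arr ind 0 > PySem.List.pyGetD arr j 0
              then (j - 1) - ind else pvRightAux arr n ind c (j + 1)

def pvRight (arr : List Int) (n ind : Int) : Int :=
  pvRightAux arr n ind (n - ind - 1).toNat (ind + 1)

-- for i in range(n-1,0,-1): res[i] = max(res[i], res[i+1])   (fuel = current index)
def pvSuffA (res : List Int) : Nat → List Int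
  | 0 => res
  | i+1 => pvSuffA (res.set (i+1) (max (res.getD (i+1) 0) (res.getD (i+2) 0))) i

def maxOfMin (arr : List Int) (n : Int) : List Int :=
  let res0 : List Int := List.replicate (n + 1).toNat 0   -- res = [0]*(n+1)
  let res1 := (List.range n.toNat).foldl (fun (res : List Int) (i : Nat) =>
      let m := pvLeft arr (i : Int) + pvRight arr n (i : Int) + 1
      res.set m.toNat (max (PySem.List.pyGetD arr (i : Int) 0) (res.getD m.toNat 0))) res0
  (pvSuffA res1 (n - 1).toNat).drop 1   -- res[1:]

-- ===== PORT B =====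
-- while st and xs[st[-1]] >= x: st.pop()     (stack head = top)
def pvPop (xs : List Int) (x : Int) : List Nat → List Nat
  | [] => []
  | t :: ts => if xs.getD t 0 ≥ x then pvPop xs x ts else t :: ts

-- body of nearest_smaller: fuel c = remaining indices, i = current index
def pvNSAux (xs : List Int) : Nat → List Nat → Nat → List Int
  | _, _, 0 => []
  | i, st, c+1 =>
    let st' := pvPop xs (xs.getD i 0) st
    (match st' with | [] => (-1 : Int) | t :: _ => (t : Int)) :: pvNSAux xs (i + 1) (i :: st') c

def pvNS (xs : List Int) : List Int := pvNSAux xs 0 [] xs.length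

-- for k in range(n-1,0,-1): if res[k+1] > res[k]: res[k] = res[k+1]   (fuel = current index)
def pvSuffB (res : List Int) : Nat → List Int
  | 0 => res
  | k+1 => pvSuffB (if res.getD (k+2) 0 > res.getD (k+1) 0
                    then res.set (k+1) (res.getD (k+2) 0) else res) k

def maxOfMin_alt (arr : List Int) (n : Int) : List Int :=
  if n ≤ 0 then []
  else
    let a := List.take n.toNat arr        -- arr[:n]  (exact: 0 < n here)
    let prev := pvNS a
    let prevRev := pvNS a.reverse
    let res0 : List Int := List.replicate (n + 1).toNat 0
    let res1 := (List.range n.toNat).foldl (fun res i =>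
        let q := prevRev.getD (n.toNat - 1 - i) 0
        let nxt := if q ≠ -1 then n - 1 - q else n
        let m := nxt - prev.getD i 0 - 1
        if a.getD i 0 > res.getD m.toNat 0 then res.set m.toNat (a.getD i 0) else res) res0
    (pvSuffB res1 (n - 1).toNat).drop 1

-- ===== PRECONDITION & SPEC =====
-- Pre_ excludes exactly n > len(arr), where A raises IndexError (B raises there too).
def Pre_maxOfMin (arr : List Int) (n : Int) : Prop := n ≤ (arr.length : Int)
instance (arr : List Int) (n : Int) : Decidable (Pre_maxOfMin arr n) := by unfold Pre_maxOfMin; infer_instance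

def pvWitness_maxOfMin : List Int × Int := ([10, 20, 30, 50, 10, 70, 30], 7)

def Spec_maxOfMin (arr : List Int) (n : Int) (out : List Int) : Prop := out = maxOfMin_alt arr n
instance (arr : List Int) (n : Int) (out : List Int) : Decidable (Spec_maxOfMin arr n out) := by unfold Spec_maxOfMin; infer_instance

-- ===== CLAIM (what is proved, stated in full; the proofs are below) =====
def Claim_equal_maxOfMin : Prop := ∀ (arr : List Int) (n : Int), Dom_maxOfMin arr n → Pre_maxOfMin arr n → Spec_maxOfMin arr n (maxOfMin arr n)

-- ===== LEMMAS AND PROOFS =====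

-- Specification scan: nearest j < k with xs[j] < x, scanning k-1, k-2, …; -1 if none.
def pvScan (xs : List Int) (x : Int) : Nat → Int
  | 0 => -1
  | k+1 => if xs.getD k 0 < x then (k : Int) else pvScan xs x k

theorem pvScan_ge (xs : List Int) (x : Int) (k : Nat) : -1 ≤ pvScan xs x k := by
  induction k with
  | zero => simp [pvScan]
  | succ k ih => simp only [pvScan]; split <;> omega

theorem pvScan_lt (xs : List Int) (x : Int) (k : Nat) : pvScan xs x k < (k : Int) := by
  induction k with
  | zero => simp [pvScan]
  | succ k ih => simp only [pvScan]; split <;> push_cast <;> omega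

-- characterisation of pvScan
theorem pvScan_spec (xs : List Int) (x : Int) (k : Nat) :
    (pvScan xs x k = -1 ∧ ∀ j, j < k → x ≤ xs.getD j 0) ∨
    (∃ j : Nat, pvScan xs x k = (j : Int) ∧ j < k ∧ xs.getD j 0 < x ∧
      ∀ m, j < m → m < k → x ≤ xs.getD m 0) := by
  induction k with
  | zero => exact Or.inl ⟨rfl, by omega⟩
  | succ k ih =>
    simp only [pvScan]
    split
    · next h => exact Or.inr ⟨k, rfl, by omega, h, by omega⟩
    · next h =>
      rcases ih with ⟨h1, h2⟩ | ⟨j, h1, h2, h3, h4⟩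
      · exact Or.inl ⟨h1, fun j hj => by
          rcases Nat.lt_succ_iff_lt_or_eq.mp hj with hj | rfl
          · exact h2 j hj
          · omega⟩
      · refine Or.inr ⟨j, h1, by omega, h3, fun m hm1 hm2 => ?_⟩
        rcases Nat.lt_succ_iff_lt_or_eq.mp hm2 with hm | rfl
        · exact h4 m hm1 hm
        · omega

-- skipping: if all of [t, k) are ≥ x the scan from k equals the scan from t
theorem pvScan_skip (xs : List Int) (x : Int) (t k : Nat) (htk : t ≤ k)
    (h : ∀ m, t ≤ m → m < k → x ≤ xs.getD m 0) : pvScan xs x k = pvScan xs x t := by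
  induction k with
  | zero => interval_cases t; rfl
  | succ k ih =>
    rcases Nat.eq_or_lt_of_le htk with rfl | hlt
    · rfl
    · have hk : t ≤ k := by omega
      simp only [pvScan]
      rw [if_neg (by have := h k hk (by omega); omega)]
      exact ih hk (fun m h1 h2 => h m h1 (by omega))

-- the stack after pushing i (Python st after iteration i)
def pvChain (xs : List Int) (i : Nat) : List Nat :=
  i :: (if 0 ≤ pvScan xs (xs.getD i 0) i
        then pvChain xs (pvScan xs (xs.getD i 0) i).toNat else [])
termination_by i
decreasing_by
  have := pvScan_lt xs (xs.getD i 0) i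
  rename_i h
  omega

-- the stack before iteration i
def pvStk (xs : List Int) : Nat → List Nat
  | 0 => []
  | i+1 => pvChain xs i

theorem pvStk_scan (xs : List Int) (x : Int) (i : Nat) :
    pvStk xs (pvScan xs x i + 1).toNat =
      (if 0 ≤ pvScan xs x i then pvChain xs (pvScan xs x i).toNat else []) := by
  have hge := pvScan_ge xs x i
  by_cases h : 0 ≤ pvScan xs x i
  · rw [if_pos h]
    have he : (pvScan xs x i + 1).toNat = (pvScan xs x i).toNat + 1 := by omega
    rw [he]; rfl
  · rw [if_neg h]
    have he : (pvScan xs x i + 1).toNat = 0 := by omega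
    rw [he]; rfl

theorem pvPop_stk (xs : List Int) (x : Int) (i : Nat) :
    pvPop xs x (pvStk xs i) = pvStk xs (pvScan xs x i + 1).toNat := by
  induction i using Nat.strong_induction_on with
  | _ i ih =>
    match i with
    | 0 => simp [pvStk, pvPop, pvScan]
    | k+1 =>
      rw [pvStk, pvChain, ← pvStk_scan xs (xs.getD k 0) k]
      by_cases hx : xs.getD k 0 ≥ x
      · simp only [pvPop]
        rw [if_pos hx]
        have hlt := pvScan_lt xs (xs.getD k 0) k
        have hge := pvScan_ge xs (xs.getD k 0) k
        rw [ih _ (by omega)]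
        have hko : pvScan xs x (k+1) = pvScan xs x k := by
          simp only [pvScan]; rw [if_neg (by omega)]
        have hskip : pvScan xs x ((pvScan xs (xs.getD k 0) k + 1).toNat) = pvScan xs x k := by
          rcases pvScan_spec xs (xs.getD k 0) k with ⟨h1, h2⟩ | ⟨j, h1, h2, h3, h4⟩
          · rw [h1, show ((-1 : Int) + 1).toNat = 0 by decide]
            exact (pvScan_skip xs x 0 k (by omega)
              (fun m _ hm2 => le_trans hx (h2 m hm2))).symm
          · rw [h1, show ((j : Int) + 1).toNat = j + 1 by omega]
            exact (pvScan_skip xs x (j+1) k (by omega)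
              (fun m hm1 hm2 => le_trans hx (h4 m (by omega) hm2))).symm
        rw [hskip, hko]
      · simp only [pvPop]
        rw [if_neg hx]
        have hko : pvScan xs x (k+1) = (k : Int) := by
          simp only [pvScan]; rw [if_pos (by omega)]
        rw [hko, show ((k : Int) + 1).toNat = k + 1 by omega]
        conv_rhs => rw [pvStk, pvChain]
        rw [← pvStk_scan xs (xs.getD k 0) k]

theorem pvNSAux_spec (xs : List Int) (c i : Nat) :
    pvNSAux xs i (pvStk xs i) c = (List.range' i c).map (fun k => pvScan xs (xs.getD k 0) k) := by
  induction c generalizing i with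
  | zero => simp [pvNSAux]
  | succ c ih =>
    rw [List.range'_succ, List.map_cons]
    have hge := pvScan_ge xs (xs.getD i 0) i
    have hpop := pvPop_stk xs (xs.getD i 0) i
    have hst : i :: pvStk xs (pvScan xs (xs.getD i 0) i + 1).toNat = pvStk xs (i + 1) := by
      conv_rhs => rw [pvStk, pvChain]
      rw [pvStk_scan]
    have hhead : (match pvStk xs (pvScan xs (xs.getD i 0) i + 1).toNat with
        | [] => (-1 : Int) | t :: _ => (t : Int)) = pvScan xs (xs.getD i 0) i := by
      by_cases h : 0 ≤ pvScan xs (xs.getD i 0) i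
      · rw [show (pvScan xs (xs.getD i 0) i + 1).toNat = (pvScan xs (xs.getD i 0) i).toNat + 1
            by omega, pvStk, pvChain]
        show ((pvScan xs (xs.getD i 0) i).toNat : Int) = _
        omega
      · rw [show (pvScan xs (xs.getD i 0) i + 1).toNat = 0 by omega, pvStk]
        show (-1 : Int) = _
        omega
    show (let st' := pvPop xs (xs.getD i 0) (pvStk xs i)
      (match st' with | [] => (-1 : Int) | t :: _ => (t : Int)) :: pvNSAux xs (i + 1) (i :: st') c)
      = _
    simp only
    rw [hpop, hhead, hst, ih (i+1)]

theorem pvNS_getD (xs : List Int) (i : Nat) (hi : i < xs.length) :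
    (pvNS xs).getD i 0 = pvScan xs (xs.getD i 0) i := by
  have h0 : pvNS xs = pvNSAux xs 0 (pvStk xs 0) xs.length := rfl
  rw [h0, pvNSAux_spec]
  have hlen : i < ((List.range' 0 xs.length).map
      (fun k => pvScan xs (xs.getD k 0) k)).length := by simpa using hi
  rw [List.getD_eq_getElem _ _ hlen]
  simp

-- getD bridges
theorem pv_getD_reverse (xs : List Int) (i : Nat) (h : i < xs.length) :
    xs.reverse.getD i 0 = xs.getD (xs.length - 1 - i) 0 := by
  have h1 : i < xs.reverse.length := by simpa using h
  rw [List.getD_eq_getElem _ _ h1, List.getElem_reverse, List.getD_eq_getElem _ _ (by omega)]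

theorem pv_getD_take (arr : List Int) (N k : Nat) (hk : k < N) (h : N ≤ arr.length) :
    (arr.take N).getD k 0 = arr.getD k 0 := by
  have h1 : k < (arr.take N).length := by simp; omega
  rw [List.getD_eq_getElem _ _ h1, List.getElem_take, List.getD_eq_getElem _ _ (by omega)]

-- A's left loop is the backward specification scan
theorem pvLeftAux_eq (arr : List Int) (N : Nat) (hN : N ≤ arr.length) (ind : Int)
    (k : Nat) (hk : k ≤ N) :
    pvLeftAux arr ind k = ind - pvScan (arr.take N) (PySem.List.pyGetD arr ind 0) k - 1 := by
  induction k with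
  | zero => simp [pvLeftAux, pvScan]
  | succ k ih =>
    simp only [pvLeftAux, pvScan, gt_iff_lt]
    rw [PySem.List.pyGetD_natCast, ← pv_getD_take arr N k (by omega) hN]
    split
    · omega
    · exact ih (by omega)

theorem pvLeft_eq (arr : List Int) (N : Nat) (hN : N ≤ arr.length) (i : Nat) (hi : i < N) :
    pvLeft arr (i : Int) =
      (i : Int) - pvScan (arr.take N) (PySem.List.pyGetD arr (i : Int) 0) i - 1 := by
  unfold pvLeft
  rw [Int.toNat_natCast]
  exact pvLeftAux_eq arr N hN _ i (le_of_lt hi)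

-- forward specification scan (first j' ≥ j with xs[j'] < x among the next c, else j+c)
def pvFwd (xs : List Int) (x : Int) : Nat → Nat → Int
  | 0, j => (j : Int)
  | c+1, j => if xs.getD j 0 < x then (j : Int) else pvFwd xs x c (j + 1)

-- A's right loop is the forward specification scan
theorem pvRightAux_eq (arr : List Int) (N : Nat) (hN : N ≤ arr.length) (n ind : Int)
    (hn : n = (N : Int)) (c : Nat) : ∀ j : Nat, j + c = N →
    pvRightAux arr n ind c (j : Int) =
      pvFwd (arr.take N) (PySem.List.pyGetD arr ind 0) c j - ind - 1 := by
  induction c with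
  | zero => intro j hj; simp only [pvRightAux, pvFwd]; omega
  | succ c ih =>
    intro j hj
    simp only [pvRightAux, pvFwd, gt_iff_lt]
    rw [PySem.List.pyGetD_natCast, ← pv_getD_take arr N j (by omega) hN]
    split
    · omega
    · rw [show (j : Int) + 1 = ((j + 1 : Nat) : Int) by omega]
      exact ih (j + 1) (by omega)

-- the forward scan is the backward scan on the reversed list
theorem pvFwd_rev (xs : List Int) (x : Int) (N : Nat) (hlen : xs.length = N) :
    ∀ c, c ≤ N → pvFwd xs x c (N - c) = (N : Int) - 1 - pvScan xs.reverse x c := by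
  intro c
  induction c with
  | zero => intro _; simp [pvFwd, pvScan]
  | succ c ih =>
    intro hc
    simp only [pvFwd, pvScan]
    have hrev : xs.reverse.getD c 0 = xs.getD (N - 1 - c) 0 := by
      rw [pv_getD_reverse xs c (by omega), hlen]
    rw [show N - (c+1) = N - 1 - c by omega, ← hrev]
    split
    · omega
    · rw [show N - 1 - c + 1 = N - c by omega]
      exact ih (by omega)

-- pointwise: A's window size at i equals B's, and it lies in [1, N]
theorem pv_m_eq (arr : List Int) (n : Int) (N : Nat) (hnN : n = (N : Int))
    (hNlen : N ≤ arr.length) (i : Nat) (hi : i < N) :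
    PySem.List.pyGetD arr (i : Int) 0 = (List.take n.toNat arr).getD i 0 ∧
    pvLeft arr (i : Int) + pvRight arr n (i : Int) + 1 =
      (if (pvNS (List.take n.toNat arr).reverse).getD (n.toNat - 1 - i) 0 ≠ -1
        then n - 1 - (pvNS (List.take n.toNat arr).reverse).getD (n.toNat - 1 - i) 0 else n)
      - (pvNS (List.take n.toNat arr)).getD i 0 - 1 ∧
    1 ≤ pvLeft arr (i : Int) + pvRight arr n (i : Int) + 1 ∧
    pvLeft arr (i : Int) + pvRight arr n (i : Int) + 1 ≤ (N : Int) := by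
  have hNn : n.toNat = N := by omega
  rw [hNn]
  have ha : (List.take N arr).length = N := by simp; omega
  have hx : PySem.List.pyGetD arr (i : Int) 0 = (List.take N arr).getD i 0 := by
    rw [PySem.List.pyGetD_natCast, pv_getD_take arr N i hi hNlen]
  refine ⟨hx, ?_⟩
  have hrevlen : i < (List.take N arr).reverse.length := by simp; omega
  have hrevx : (List.take N arr).reverse.getD (N - 1 - i) 0 = (List.take N arr).getD i 0 := by
    rw [pv_getD_reverse _ _ (by omega), ha, show N - 1 - (N - 1 - i) = i by omega]
  have hq : (pvNS (List.take N arr).reverse).getD (N - 1 - i) 0 =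
      pvScan (List.take N arr).reverse (PySem.List.pyGetD arr (i : Int) 0) (N - 1 - i) := by
    rw [pvNS_getD _ _ (by simp; omega), hrevx, hx]
  have hp : (pvNS (List.take N arr)).getD i 0 =
      pvScan (List.take N arr) (PySem.List.pyGetD arr (i : Int) 0) i := by
    rw [pvNS_getD _ _ (by omega), ← hx]
  have hL := pvLeft_eq arr N hNlen i hi
  have hR : pvRight arr n (i : Int) =
      ((N : Int) - 1 - pvScan (List.take N arr).reverse (PySem.List.pyGetD arr (i : Int) 0)
        (N - 1 - i)) - (i : Int) - 1 := by
    unfold pvRight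
    rw [show (n - (i : Int) - 1).toNat = N - 1 - i by omega,
      show (i : Int) + 1 = ((i + 1 : Nat) : Int) by omega,
      pvRightAux_eq arr N hNlen n (i : Int) hnN (N - 1 - i) (i + 1) (by omega),
      show i + 1 = N - (N - 1 - i) by omega,
      pvFwd_rev (List.take N arr) _ N ha (N - 1 - i) (by omega)]
  have hqge := pvScan_ge (List.take N arr).reverse (PySem.List.pyGetD arr (i : Int) 0) (N - 1 - i)
  have hqlt := pvScan_lt (List.take N arr).reverse (PySem.List.pyGetD arr (i : Int) 0) (N - 1 - i)
  have hpge := pvScan_ge (List.take N arr) (PySem.List.pyGetD arr (i : Int) 0) i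
  have hplt := pvScan_lt (List.take N arr) (PySem.List.pyGetD arr (i : Int) 0) i
  rw [hq, hp, hL, hR]
  by_cases hqneg : pvScan (List.take N arr).reverse (PySem.List.pyGetD arr (i : Int) 0)
      (N - 1 - i) = -1
  · rw [if_neg (by omega)]
    omega
  · rw [if_pos (by omega)]
    omega

-- A's fill loop preserves the length of res
theorem pv_fill_len (arr : List Int) (n : Int) : ∀ (l : List Nat) (res : List Int),
    (l.foldl (fun (res : List Int) (i : Nat) =>
      res.set (pvLeft arr (i : Int) + pvRight arr n (i : Int) + 1).toNat
        (max (PySem.List.pyGetD arr (i : Int) 0)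
          (res.getD (pvLeft arr (i : Int) + pvRight arr n (i : Int) + 1).toNat 0))) res).length = res.length := by
  intro l
  induction l with
  | nil => intro res; rfl
  | cons a l ih => intro res; rw [List.foldl_cons, ih]; simp

-- the two fill loops agree
theorem pv_fill_eq (arr : List Int) (n : Int) (N : Nat) (hnN : n = (N : Int))
    (hNlen : N ≤ arr.length) :
    ∀ (l : List Nat), (∀ i ∈ l, i < N) → ∀ res : List Int, res.length = N + 1 →
    (l.foldl (fun (res : List Int) (i : Nat) =>
      res.set (pvLeft arr (i : Int) + pvRight arr n (i : Int) + 1).toNat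
        (max (PySem.List.pyGetD arr (i : Int) 0)
          (res.getD (pvLeft arr (i : Int) + pvRight arr n (i : Int) + 1).toNat 0))) res)
    =
    (l.foldl (fun (res : List Int) (i : Nat) =>
      if (List.take n.toNat arr).getD i 0 >
          res.getD ((if (pvNS (List.take n.toNat arr).reverse).getD (n.toNat - 1 - i) 0 ≠ -1
              then n - 1 - (pvNS (List.take n.toNat arr).reverse).getD (n.toNat - 1 - i) 0
              else n) - (pvNS (List.take n.toNat arr)).getD i 0 - 1).toNat 0
      then res.set ((if (pvNS (List.take n.toNat arr).reverse).getD (n.toNat - 1 - i) 0 ≠ -1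
              then n - 1 - (pvNS (List.take n.toNat arr).reverse).getD (n.toNat - 1 - i) 0
              else n) - (pvNS (List.take n.toNat arr)).getD i 0 - 1).toNat
            ((List.take n.toNat arr).getD i 0)
      else res) res) := by
  intro l
  induction l with
  | nil => intro _ res _; rfl
  | cons j l ih =>
    intro hl res hres
    rw [List.foldl_cons, List.foldl_cons]
    obtain ⟨hx, hm, hb1, hb2⟩ := pv_m_eq arr n N hnN hNlen j (hl j (by simp))
    simp only [← hm, ← hx]
    have hmlt : (pvLeft arr (j : Int) + pvRight arr n (j : Int) + 1).toNat < res.length := by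
      omega
    by_cases hgt : PySem.List.pyGetD arr (j : Int) 0 >
        res.getD (pvLeft arr (j : Int) + pvRight arr n (j : Int) + 1).toNat 0
    · rw [if_pos hgt, max_eq_left (le_of_lt hgt)]
      exact ih (fun i hi => hl i (by simp [hi])) _ (by rw [List.length_set, hres])
    · rw [if_neg hgt, max_eq_right (not_lt.mp hgt)]
      rw [List.getD_eq_getElem _ _ hmlt, List.set_getElem_self]
      exact ih (fun i hi => hl i (by simp [hi])) _ hres

-- the two suffix-max sweeps agree
theorem pv_suff_eq : ∀ (k : Nat) (res : List Int), k < res.length → pvSuffA res k = pvSuffB res k := by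
  intro k
  induction k with
  | zero => intro res _; rfl
  | succ k ih =>
    intro res hk
    simp only [pvSuffA, pvSuffB]
    by_cases h : res.getD (k+2) 0 > res.getD (k+1) 0
    · rw [if_pos h, max_eq_right (le_of_lt h)]
      exact ih _ (by rw [List.length_set]; omega)
    · rw [if_neg h, max_eq_left (not_lt.mp h)]
      rw [List.getD_eq_getElem _ _ hk, List.set_getElem_self]
      exact ih _ (by omega)

-- ===== VERDICT (by name: the statement is the Claim_ definition above) =====
theorem maxOfMin_spec : Claim_equal_maxOfMin := by
  intro arr n hdom hpre
  show maxOfMin arr n = maxOfMin_alt arr n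
  simp only [maxOfMin, maxOfMin_alt]
  by_cases hn : n ≤ 0
  · rw [if_pos hn]
    rw [show n.toNat = 0 by omega, show (n - 1).toNat = 0 by omega]
    simp only [List.range_zero, List.foldl_nil, pvSuffA]
    rw [List.drop_eq_nil_iff]
    simp only [List.length_replicate]
    omega
  · rw [if_neg hn]
    have hpre' : n ≤ (arr.length : Int) := hpre
    have hNlen : n.toNat ≤ arr.length := by omega
    have hnN : n = ((n.toNat : Nat) : Int) := by omega
    have hfill := pv_fill_eq arr n n.toNat hnN hNlen (List.range n.toNat)
      (fun i hi => List.mem_range.mp hi)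
      (List.replicate (n + 1).toNat 0) (by rw [List.length_replicate]; omega)
    rw [hfill]
    congr 1
    apply pv_suff_eq
    rw [← hfill, pv_fill_len, List.length_replicate]
    omega
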